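-- pv_equiv track=rewrite | github.com/linyue-ma/Search-Gen-V | Search-Gen-V/evaluator/eval/nugget_eval/common.py | aggregate_assignment
-- ===== SOURCE A (Python) =====
-- from typing import List, Dict, Any, Tuple, Optional, cast
-- from collections import defaultdict
--
-- MATCH_PRIORITY = {
--     "not_support": 0,
--     "partial_support": 1,
--     "support": 2,
--     "error": -1
-- }
--
-- PRIORITY_TO_LABEL = {v: k for k, v in MATCH_PRIORITY.items()}
--
-- def aggregate_assignment(predicted_results: List[Dict[str, Any]],
--                            gold_data: Dict[str, Any]) -> Tuple[List[str], List[str]]: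
--     """
--     Aggregate block-level predictions to overall match predictions
--
--     Returns:
--         Tuple of (overall_y_true, overall_y_pred)
--     """
--     overall_y_true, overall_y_pred = [], []
--
--     # Group predictions by qid
--     predicted_data_by_qid = defaultdict(list)
--     for res in predicted_results:
--         predicted_data_by_qid[res["qid"]].append(res)
--
--     for qid, pred_entries in predicted_data_by_qid.items():
--         if qid not in gold_data:
--             continue
--
--         # Group predictions by nugget text and find max priority
--         nugget_preds_for_qid = defaultdict(list)
--         for entry in pred_entries:
--             if entry["block_pred"] is not None:
--                 nugget_preds_for_qid[entry["nugget_text"]].append(entry["block_pred"])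
--
--         predicted_assignment = {}
--         for text, preds in nugget_preds_for_qid.items():
--             if preds:
--                 max_score = max(MATCH_PRIORITY.get(p, -1) for p in preds)
--                 predicted_assignment[text] = PRIORITY_TO_LABEL.get(max_score, "not_support")
--
--         # Get gold standard overall match
--         gold_item = gold_data[qid]
--         gold_assignment_dict = {
--             nug["text"]: nug["assignment"]
--             for nug in gold_item.get("global_nuggets_assignment", [])
--         }
--
--         # Collect predictions for evaluation
--         for text, true_label in gold_assignment_dict.items():
--             pred_label = predicted_assignment.get(text)
--             if pred_label is not None:
--                 overall_y_true.append(true_label)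
--                 overall_y_pred.append(pred_label)
--
--     return overall_y_true, overall_y_pred
-- ===== SOURCE B (Python) =====
-- MATCH_PRIORITY = {
--     "not_support": 0,
--     "partial_support": 1,
--     "support": 2,
--     "error": -1
-- }
--
-- PRIORITY_TO_LABEL = {v: k for k, v in MATCH_PRIORITY.items()}
--
-- def aggregate_assignment(predicted_results, gold_data):
--     """Gold-driven brute-force rescan: no grouping dicts or prediction lists are
--     ever built.  Walk predicted_results once to visit each qid at its first
--     appearance; for each gold nugget of a gold-relevant qid, scan
--     predicted_results directly, keeping a running max priority."""
--     overall_y_true, overall_y_pred = [], []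
--     seen = set()
--     for res in predicted_results:
--         qid = res["qid"]
--         if qid in seen:
--             continue
--         seen.add(qid)
--         if qid not in gold_data:
--             continue
--         gold_nuggets = gold_data[qid].get("global_nuggets_assignment", [])
--         gold_dict = {nug["text"]: nug["assignment"] for nug in gold_nuggets}
--         for text, true_label in gold_dict.items():
--             best = -2
--             for entry in predicted_results:
--                 if entry["qid"] == qid and entry["block_pred"] is not None and entry["nugget_text"] == text:
--                     score = MATCH_PRIORITY.get(entry["block_pred"], -1)
--                     if score > best:
--                         best = score
--             if best > -2:
--                 overall_y_true.append(true_label)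
--                 overall_y_pred.append(PRIORITY_TO_LABEL.get(best, "not_support"))
--     return overall_y_true, overall_y_pred
-- ===== Notes on version B (the rewrite author's own statement) =====
-- stated objective: alternative
-- what changed: A's hash-based grouping (group entries by qid, group block_preds per nugget text into lists, max over each list, dict lookups at emission) is replaced by a gold-driven brute-force rescan: a first-seen-qid walk plus, for each gold nugget, a direct scan of predicted_results keeping a running max priority; no intermediate dicts or lists over the predictions are built (trades the grouping index for repeated scans).
import Mathlib
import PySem

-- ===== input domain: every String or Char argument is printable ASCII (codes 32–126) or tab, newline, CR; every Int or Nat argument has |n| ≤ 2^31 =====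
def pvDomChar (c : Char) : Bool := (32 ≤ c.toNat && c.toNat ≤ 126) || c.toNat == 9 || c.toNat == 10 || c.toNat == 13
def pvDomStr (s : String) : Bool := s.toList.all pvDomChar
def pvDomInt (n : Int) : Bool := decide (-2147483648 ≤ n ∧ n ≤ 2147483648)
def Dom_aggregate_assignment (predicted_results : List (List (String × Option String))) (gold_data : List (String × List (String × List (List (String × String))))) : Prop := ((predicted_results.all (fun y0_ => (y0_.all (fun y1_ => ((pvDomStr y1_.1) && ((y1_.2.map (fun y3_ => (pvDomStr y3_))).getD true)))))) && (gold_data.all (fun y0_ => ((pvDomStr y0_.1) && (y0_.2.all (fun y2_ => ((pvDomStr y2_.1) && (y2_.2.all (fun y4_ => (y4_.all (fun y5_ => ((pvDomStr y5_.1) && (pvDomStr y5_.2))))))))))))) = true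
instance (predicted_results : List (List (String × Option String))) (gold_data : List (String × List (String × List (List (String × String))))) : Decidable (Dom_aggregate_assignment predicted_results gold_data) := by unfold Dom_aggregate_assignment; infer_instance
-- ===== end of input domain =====

-- B replaces A's hash-based grouping (qid groups, per-text block_pred lists, max per
-- list, dict lookups at emission) by a gold-driven brute-force rescan: one first-seen
-- qid walk plus a direct running-max scan of predicted_results per gold nugget; no
-- intermediate dicts or lists over the predictions are built. Same return value.

abbrev PvEntry := List (String × Option String)
abbrev PvGoldItem := List (String × List (List (String × String)))

def pvMATCH_PRIORITY : PySem.Dict String Int :=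
  PySem.Dict.mk [("not_support", 0), ("partial_support", 1), ("support", 2), ("error", -1)]

-- PRIORITY_TO_LABEL = {v: k for k, v in MATCH_PRIORITY.items()}
def pvPRIORITY_TO_LABEL : PySem.Dict Int String :=
  pvMATCH_PRIORITY.items.foldl (fun d p => d.insert p.2 p.1) PySem.Dict.empty

-- res["qid"] / res["block_pred"] / res["nugget_text"]: the value type is Option String, so
-- a present value is returned as is; a MISSING key yields the default none (Python raises
-- KeyError on the paths where it reads a missing key — those inputs are outside Pre_).
def pvQid (res : PvEntry) : Option String := (PySem.Dict.mk res).getD "qid" none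
def pvBp (res : PvEntry) : Option String := (PySem.Dict.mk res).getD "block_pred" none
def pvText (res : PvEntry) : Option String := (PySem.Dict.mk res).getD "nugget_text" none

-- MATCH_PRIORITY.get(p, -1)  (appears in both Pythons)
def pvScore (bp : String) : Int := pvMATCH_PRIORITY.getD bp (-1)

-- {nug["text"]: nug["assignment"] for nug in gold_item.get("global_nuggets_assignment", [])}
-- (identical comprehension in A and B; a nugget missing "text"/"assignment" raises in both
-- Pythons — outside Pre_ — so the "" defaults are never reached on admitted inputs)
def pvGoldDict (item : PvGoldItem) : PySem.Dict String String :=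
  ((PySem.Dict.mk item).getD "global_nuggets_assignment" []).foldl
    (fun d nug =>
      d.insert ((PySem.Dict.mk nug).getD "text" "") ((PySem.Dict.mk nug).getD "assignment" ""))
    PySem.Dict.empty

-- ===== PORT A =====
-- body of A's per-entry grouping of block_preds by nugget text
def pvNugStep (d : PySem.Dict (Option String) (List String)) (e : PvEntry) :
    PySem.Dict (Option String) (List String) :=
  match pvBp e with
  | some bp => d.modify (pvText e) [] (· ++ [bp])
  | none => d

-- nugget_preds_for_qid for one qid group
def pvNug (g : List PvEntry) : PySem.Dict (Option String) (List String) :=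
  g.foldl pvNugStep PySem.Dict.empty

-- body of A's predicted_assignment loop: 'if preds: max_score = max(...); ...'
def pvPaStep (pa : PySem.Dict (Option String) String) (tp : Option String × List String) :
    PySem.Dict (Option String) String :=
  if tp.2 ≠ [] then
    match PySem.List.max? (tp.2.map (fun p => pvScore p)) (fun x => x) with
    | some max_score => pa.insert tp.1 (pvPRIORITY_TO_LABEL.getD max_score "not_support")
    | none => pa
  else pa

-- predicted_assignment for one qid group
def pvPA (g : List PvEntry) : PySem.Dict (Option String) String :=
  (pvNug g).items.foldl pvPaStep PySem.Dict.empty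

-- one iteration of A's outer 'for qid, pred_entries in predicted_data_by_qid.items()' loop;
-- 'if qid not in gold_data: continue' — qid is Optional and None is never a key of the
-- str-keyed gold_data, so the none case is the continue branch
def pvEmitA (gold_data : List (String × List (String × List (List (String × String)))))
    (acc : List String × List String) (qp : Option String × List PvEntry) :
    List String × List String :=
  match qp.1 with
  | none => acc
  | some q =>
    if (PySem.Dict.mk gold_data).contains q then
      (pvGoldDict ((PySem.Dict.mk gold_data).getD q [])).items.foldl (fun acc2 tv =>
        -- predicted_assignment.get(text): text is a str, the keys are Optional values
        match (pvPA qp.2).get? (some tv.1) with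
        | some pred_label => (acc2.1 ++ [tv.2], acc2.2 ++ [pred_label])
        | none => acc2) acc
    else acc

def aggregate_assignment (predicted_results : List (List (String × Option String))) (gold_data : List (String × List (String × List (List (String × String))))) : List String × List String :=
  -- predicted_data_by_qid = defaultdict(list); predicted_data_by_qid[res["qid"]].append(res)
  (predicted_results.foldl (fun d res => d.modify (pvQid res) [] (· ++ [res]))
      PySem.Dict.empty).items.foldl (pvEmitA gold_data) ([], [])

-- ===== PORT B =====
-- B's innermost loop body: 'if entry["qid"] == qid and entry["block_pred"] is not None
-- and entry["nugget_text"] == text: score = ...; if score > best: best = score'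
def pvInnerStepB (qid : Option String) (text : String) (best : Int) (e : PvEntry) : Int :=
  if pvQid e == qid then
    match pvBp e with
    | none => best
    | some bp =>
      if pvText e == some text then
        let score := pvScore bp
        if score > best then score else best
      else best
  else best

-- 'best = -2; for entry in predicted_results: …'
def pvBestB (preds : List PvEntry) (qid : Option String) (text : String) : Int :=
  preds.foldl (pvInnerStepB qid text) (-2)

-- the body of B's per-first-seen-qid processing: 'if qid not in gold_data: continue;
-- gold_dict = …; for text, true_label in gold_dict.items(): …' (a None qid is never a
-- key of the str-keyed gold_data, so the none case is the continue branch)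
def pvEmitKB (gold_data : List (String × List (String × List (List (String × String)))))
    (preds : List PvEntry) (acc : List String × List String) (qid : Option String) :
    List String × List String :=
  match qid with
  | none => acc
  | some q =>
    if (PySem.Dict.mk gold_data).contains q then
      (pvGoldDict ((PySem.Dict.mk gold_data).getD q [])).items.foldl (fun acc2 tv =>
        let best := pvBestB preds (some q) tv.1
        if best > -2 then
          (acc2.1 ++ [tv.2], acc2.2 ++ [pvPRIORITY_TO_LABEL.getD best "not_support"])
        else acc2) acc
    else acc

-- one iteration of B's outer loop: 'qid = res["qid"]; if qid in seen: continue; seen.add(qid); …'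
def pvStepB (gold_data : List (String × List (String × List (List (String × String)))))
    (preds : List PvEntry)
    (st : PySem.Set (Option String) × (List String × List String)) (res : PvEntry) :
    PySem.Set (Option String) × (List String × List String) :=
  let qid := pvQid res
  if PySem.Set.contains st.1 qid then st
  else (PySem.Set.add st.1 qid, pvEmitKB gold_data preds st.2 qid)

def aggregate_assignment_alt (predicted_results : List (List (String × Option String))) (gold_data : List (String × List (String × List (List (String × String))))) : List String × List String :=
  (predicted_results.foldl (pvStepB gold_data predicted_results)
    (PySem.Set.empty, ([], []))).2

-- ===== PRECONDITION & SPEC =====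
-- Pre_ is exactly where Python A returns (no KeyError): every entry carries "qid"; an
-- entry whose qid is a gold key carries "block_pred" (and "nugget_text" whenever that
-- block_pred is not None); and the nuggets of every gold item actually retrieved carry
-- "text" and "assignment".
def Pre_aggregate_assignment (predicted_results : List (List (String × Option String))) (gold_data : List (String × List (String × List (List (String × String))))) : Prop :=
  ∀ res ∈ predicted_results,
    (PySem.Dict.mk res).contains "qid" = true ∧
    (∀ q, pvQid res = some q → (PySem.Dict.mk gold_data).contains q = true →
      ((PySem.Dict.mk res).contains "block_pred" = true ∧
       (pvBp res ≠ none → (PySem.Dict.mk res).contains "nugget_text" = true) ∧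
       (∀ nug ∈ (PySem.Dict.mk ((PySem.Dict.mk gold_data).getD q [])).getD
            "global_nuggets_assignment" ([] : List (List (String × String))),
          (PySem.Dict.mk nug).contains "text" = true ∧
          (PySem.Dict.mk nug).contains "assignment" = true)))
instance (predicted_results : List (List (String × Option String))) (gold_data : List (String × List (String × List (List (String × String))))) : Decidable (Pre_aggregate_assignment predicted_results gold_data) := by unfold Pre_aggregate_assignment; infer_instance

def pvWitness_aggregate_assignment : (List (List (String × Option String))) × (List (String × List (String × List (List (String × String))))) :=
  ([[("qid", some "q1"), ("nugget_text", some "n1"), ("block_pred", some "not_support")],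
    [("qid", some "q1"), ("nugget_text", some "n1"), ("block_pred", some "support")]],
   [("q1", [("global_nuggets_assignment", [[("text", "n1"), ("assignment", "support")]])])])

def Spec_aggregate_assignment (predicted_results : List (List (String × Option String))) (gold_data : List (String × List (String × List (List (String × String))))) (out : List String × List String) : Prop := out = aggregate_assignment_alt predicted_results gold_data
instance (predicted_results : List (List (String × Option String))) (gold_data : List (String × List (String × List (List (String × String))))) (out : List String × List String) : Decidable (Spec_aggregate_assignment predicted_results gold_data out) := by unfold Spec_aggregate_assignment; infer_instance

-- ===== CLAIM (what is proved, stated in full; the proofs are below) =====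
def Claim_equal_aggregate_assignment : Prop := ∀ (predicted_results : List (List (String × Option String))) (gold_data : List (String × List (String × List (List (String × String))))), Dom_aggregate_assignment predicted_results gold_data → Pre_aggregate_assignment predicted_results gold_data → Spec_aggregate_assignment predicted_results gold_data (aggregate_assignment predicted_results gold_data)

-- ===== LEMMAS AND PROOFS =====

-- canonical per-group data used by the proofs: the block_pred strings recorded for a
-- given (group, nugget_text) in entry order
def pvScores : List PvEntry → Option String → List String
  | [], _ => []
  | e :: g, t =>
    match pvBp e with
    | some bp => (if pvText e == t then [bp] else []) ++ pvScores g t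
    | none => pvScores g t

def pvLabel (ps : List String) : String :=
  pvPRIORITY_TO_LABEL.getD ((ps.map pvScore).foldl max (-1)) "not_support"

def pvPairs (g : List PvEntry) : List (Option String × String) :=
  g.filterMap (fun e => (pvBp e).map (fun bp => (pvText e, bp)))

lemma pvScore_ge (bp : String) : -1 ≤ pvScore bp := by
  unfold pvScore pvMATCH_PRIORITY
  simp only [PySem.Dict.getD_eq_get?_getD, PySem.Dict.get?_mk_cons]
  split_ifs <;> first | decide | simp [PySem.Dict.get?]

lemma pvMax?_eq (l : List String) (h : l ≠ []) :
    PySem.List.max? (l.map (fun p => pvScore p)) (fun x => x)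
      = some ((l.map pvScore).foldl max (-1)) := by
  cases l with
  | nil => exact absurd rfl h
  | cons p rest =>
    simp only [List.map_cons, PySem.List.max?_id_cons, List.foldl_cons]
    rw [max_eq_right (pvScore_ge p)]

-- ===== A-side characterizations =====
lemma pvNug_foldl_get? (g : List PvEntry) (d : PySem.Dict (Option String) (List String))
    (t : Option String) :
    (g.foldl pvNugStep d).get? t
      = if pvScores g t = [] then d.get? t else some (d.getD t [] ++ pvScores g t) := by
  induction g generalizing d with
  | nil => simp [pvScores]
  | cons e g ih =>
    cases hbp : pvBp e with
    | none => simp only [List.foldl_cons, pvNugStep, hbp, pvScores]; exact ih d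
    | some bp =>
      simp only [List.foldl_cons, pvNugStep, hbp, pvScores]
      rw [ih]
      unfold PySem.Dict.modify
      by_cases ht : t = pvText e
      · subst ht
        simp only [beq_self_eq_true, if_true]
        rw [PySem.Dict.getD_insert, PySem.Dict.get?_insert]
        simp
      · have hne : (pvText e == t) = false := by simp [Ne.symm ht]
        simp only [hne]
        rw [PySem.Dict.getD_insert, PySem.Dict.get?_insert]
        simp [ht]

lemma pvNug_eq_pairs (g : List PvEntry) :
    pvNug g = (pvPairs g).foldl (fun d p => d.modify p.1 [] (· ++ [p.2])) PySem.Dict.empty := by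
  unfold pvNug pvPairs
  rw [List.foldl_filterMap]
  exact PySem.List.foldl_congr_mem _ _ _ _ (by
    intro acc e _
    cases hbp : pvBp e <;> simp [pvNugStep, hbp])

lemma pvNug_nodup (g : List PvEntry) : (pvNug g).keys.Nodup := by
  rw [pvNug_eq_pairs]
  exact PySem.Dict.nodup_keys_foldl_modify_key (pvPairs g) Prod.fst []
    (fun _ p => (· ++ [p.2])) PySem.Dict.empty PySem.Dict.nodup_keys_empty

lemma pvNug_getD (g : List PvEntry) (t : Option String) :
    (pvNug g).getD t [] = pvScores g t := by
  unfold pvNug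
  rw [PySem.Dict.getD_eq_get?_getD, pvNug_foldl_get?]
  split <;> simp_all [PySem.Dict.get?_empty, PySem.Dict.getD_empty]

lemma pvNug_mem_keys (g : List PvEntry) (t : Option String) :
    t ∈ (pvNug g).keys ↔ pvScores g t ≠ [] := by
  rw [← PySem.Dict.contains_iff_mem_keys, PySem.Dict.contains_eq_isSome_get?]
  unfold pvNug
  rw [pvNug_foldl_get?]
  by_cases hs : pvScores g t = [] <;> simp [hs, PySem.Dict.get?_empty]

lemma pvPA_fold_get? (g : List PvEntry) (K : List (Option String)) (hK : K.Nodup)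
    (pa : PySem.Dict (Option String) String) (t : Option String) :
    (K.foldl (fun pa k => if pvScores g k = [] then pa else pa.insert k (pvLabel (pvScores g k))) pa).get? t
      = if t ∈ K ∧ pvScores g t ≠ [] then some (pvLabel (pvScores g t)) else pa.get? t := by
  induction K generalizing pa with
  | nil => simp
  | cons k K ih =>
    simp only [List.foldl_cons]
    have hK' : K.Nodup := (List.nodup_cons.1 hK).2
    by_cases ht : t = k
    · subst ht
      have htK : t ∉ K := (List.nodup_cons.1 hK).1
      rw [ih hK']
      simp only [htK, false_and, if_false]
      by_cases hs : pvScores g t = []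
      · simp [hs]
      · simp only [hs, if_false, List.mem_cons, true_or, true_and, ne_eq, not_false_iff,
          if_true]
        rw [PySem.Dict.get?_insert]
        simp
    · rw [ih hK']
      have hpa' : (if pvScores g k = [] then pa
            else pa.insert k (pvLabel (pvScores g k))).get? t = pa.get? t := by
        split
        · rfl
        · rw [PySem.Dict.get?_insert]; simp [ht]
      by_cases hmem : t ∈ K
      · simp [hmem, hpa']
      · simp [hmem, ht, hpa']

lemma pvPA_get? (g : List PvEntry) (t : Option String) :
    (pvPA g).get? t
      = if pvScores g t = [] then none else some (pvLabel (pvScores g t)) := by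
  unfold pvPA
  rw [PySem.Dict.items_eq_map_keys (pvNug g) (pvNug_nodup g) [], List.foldl_map]
  have hcongr : ∀ (pa : PySem.Dict (Option String) String), ∀ k ∈ (pvNug g).keys,
      pvPaStep pa (k, (pvNug g).getD k []) =
        if pvScores g k = [] then pa else pa.insert k (pvLabel (pvScores g k)) := by
    intro pa k _
    rw [pvNug_getD]
    by_cases hs : pvScores g k = []
    · simp [pvPaStep, hs]
    · simp only [pvPaStep, ne_eq, hs, not_false_iff, if_true, if_false]
      rw [pvMax?_eq _ hs]
      rfl
  rw [PySem.List.foldl_congr_mem _ _ _ _ hcongr]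
  rw [pvPA_fold_get? g _ (pvNug_nodup g) _ t]
  by_cases hs : pvScores g t = []
  · simp [hs, PySem.Dict.get?_empty]
  · simp [hs, (pvNug_mem_keys g t).2 hs]

-- the A-side grouping loop: value at key k is the subsequence of entries with qid k
lemma pvGroup_getD (preds : List PvEntry) (d : PySem.Dict (Option String) (List PvEntry))
    (k : Option String) :
    (preds.foldl (fun d res => d.modify (pvQid res) [] (· ++ [res])) d).getD k []
      = d.getD k [] ++ preds.filter (fun r => pvQid r == k) := by
  induction preds generalizing d with
  | nil => simp
  | cons res preds ih =>
    simp only [List.foldl_cons, List.filter_cons]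
    rw [ih]
    by_cases hq : pvQid res = k
    · subst hq
      rw [PySem.Dict.getD_modify]
      simp
    · have : (pvQid res == k) = false := by simp [hq]
      rw [PySem.Dict.getD_modify]
      simp [Ne.symm hq, this]

lemma pvGroupA_keys (preds : List PvEntry) :
    (preds.foldl (fun d res => d.modify (pvQid res) [] (· ++ [res])) PySem.Dict.empty).keys
      = PySem.Set.update [] (preds.map pvQid) := by
  rw [PySem.Dict.keys_foldl_modify_key preds pvQid [] (fun _ res => (· ++ [res]))]
  rw [PySem.Dict.keys_empty]

lemma pvGroupA_nodup (preds : List PvEntry) :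
    (preds.foldl (fun d res => d.modify (pvQid res) [] (· ++ [res])) PySem.Dict.empty).keys.Nodup :=
  PySem.Dict.nodup_keys_foldl_modify_key preds pvQid [] (fun _ res => (· ++ [res]))
    PySem.Dict.empty PySem.Dict.nodup_keys_empty

-- ===== B-side characterizations =====
-- the keys B's seen-set walk processes, in order: first occurrences not already seen
def pvNewKeys (seen : PySem.Set (Option String)) : List (Option String) → List (Option String)
  | [] => []
  | k :: ks =>
    if PySem.Set.contains seen k then pvNewKeys seen ks
    else k :: pvNewKeys (PySem.Set.add seen k) ks

lemma pvSet_update_eq_newKeys (l : List (Option String)) (seen : PySem.Set (Option String)) :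
    PySem.Set.update seen l = seen ++ pvNewKeys seen l := by
  induction l generalizing seen with
  | nil => simp [PySem.Set.update, pvNewKeys]
  | cons k ks ih =>
    have hupd : PySem.Set.update seen (k :: ks) = PySem.Set.update (PySem.Set.add seen k) ks := by
      simp [PySem.Set.update]
    rw [hupd, ih]
    cases hc : PySem.Set.contains seen k with
    | true =>
      have : PySem.Set.add seen k = seen := by
        unfold PySem.Set.add
        simp [(PySem.Set.contains_iff _ _).1 hc]
      have hm : k ∈ seen := (PySem.Set.contains_iff _ _).1 hc
      rw [this]
      simp [pvNewKeys, hm]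
    | false =>
      have hm : k ∉ seen := by
        intro hmem
        rw [(PySem.Set.contains_iff seen k).2 hmem] at hc
        exact absurd hc (by simp)
      have : PySem.Set.add seen k = seen ++ [k] := by
        unfold PySem.Set.add
        simp [hm]
      rw [this]
      simp [pvNewKeys, hm]

-- B's fold over entries = a fold of pvEmitKB over the first-occurrence key list
lemma pvStepB_foldl (gold_data : List (String × List (String × List (List (String × String)))))
    (preds0 preds : List PvEntry) (seen : PySem.Set (Option String))
    (acc : List String × List String) :
    preds.foldl (pvStepB gold_data preds0) (seen, acc)
      = (PySem.Set.update seen (preds.map pvQid),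
         (pvNewKeys seen (preds.map pvQid)).foldl (pvEmitKB gold_data preds0) acc) := by
  induction preds generalizing seen acc with
  | nil => simp [PySem.Set.update, pvNewKeys]
  | cons res preds ih =>
    have hupd : ∀ s : PySem.Set (Option String),
        PySem.Set.update s (pvQid res :: preds.map pvQid)
          = PySem.Set.update (PySem.Set.add s (pvQid res)) (preds.map pvQid) := by
      intro s; simp [PySem.Set.update]
    simp only [List.foldl_cons, List.map_cons]
    cases hc : PySem.Set.contains seen (pvQid res) with
    | true =>
      have hadd : PySem.Set.add seen (pvQid res) = seen := by
        unfold PySem.Set.add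
        simp [(PySem.Set.contains_iff _ _).1 hc]
      have hm : pvQid res ∈ seen := (PySem.Set.contains_iff _ _).1 hc
      have hstep : pvStepB gold_data preds0 (seen, acc) res = (seen, acc) := by
        simp [pvStepB, hm]
      rw [hstep, ih, hupd, hadd]
      simp [pvNewKeys, hm]
    | false =>
      have hm : pvQid res ∉ seen := by
        intro hmem
        rw [(PySem.Set.contains_iff seen (pvQid res)).2 hmem] at hc
        exact absurd hc (by simp)
      have hstep : pvStepB gold_data preds0 (seen, acc) res
          = (PySem.Set.add seen (pvQid res), pvEmitKB gold_data preds0 acc (pvQid res)) := by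
        simp [pvStepB, hm]
      rw [hstep, ih, hupd]
      simp [pvNewKeys, hm]

-- (fun b s => if s > b then s else b) is max
lemma pvIteMax (b s : Int) : (if s > b then s else b) = max b s := by
  rw [max_def]; split_ifs <;> omega

-- the inner rescan, restricted to the qid group
lemma pvBestB_filter (preds : List PvEntry) (k : Option String) (text : String) (b : Int) :
    preds.foldl (pvInnerStepB k text) b
      = ((pvScores (preds.filter (fun r => pvQid r == k)) (some text)).map pvScore).foldl
          max b := by
  induction preds generalizing b with
  | nil => simp [pvScores]
  | cons e preds ih =>
    simp only [List.foldl_cons, List.filter_cons]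
    by_cases hq : pvQid e = k
    · have hq' : (pvQid e == k) = true := by simp [hq]
      simp only [hq']
      cases hbp : pvBp e with
      | none =>
        simp only [pvInnerStepB, hq', if_true, hbp, pvScores]
        exact ih b
      | some bp =>
        by_cases ht : pvText e = some text
        · have ht' : (pvText e == some text) = true := by simp [ht]
          simp only [pvInnerStepB, hq', if_true, hbp, ht', pvScores, List.singleton_append,
            List.map_cons, List.foldl_cons]
          rw [ih, pvIteMax]
        · have ht' : (pvText e == some text) = false := by simp [ht]
          simp only [pvInnerStepB, hq', if_true, hbp, ht', pvScores, Bool.false_eq_true,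
            if_false, List.nil_append]
          exact ih b
    · have hq' : (pvQid e == k) = false := by simp [hq]
      simp only [pvInnerStepB, hq', Bool.false_eq_true, if_false]
      exact ih b

lemma pvFoldlMax_ge (l : List Int) (b : Int) : b ≤ l.foldl max b := by
  induction l generalizing b with
  | nil => simp
  | cons x l ih => exact le_trans (le_max_left b x) (ih (max b x))

-- on a nonempty score list the -2 and -1 seeds agree (every score is ≥ -1)
lemma pvFoldlMax_seed (ps : List String) (h : ps ≠ []) :
    (ps.map pvScore).foldl max (-2) = (ps.map pvScore).foldl max (-1) := by
  cases ps with
  | nil => exact absurd rfl h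
  | cons p rest =>
    simp only [List.map_cons, List.foldl_cons]
    have h1 : max (-2 : Int) (pvScore p) = pvScore p :=
      max_eq_right (le_trans (by norm_num) (pvScore_ge p))
    have h2 : max (-1 : Int) (pvScore p) = pvScore p := max_eq_right (pvScore_ge p)
    rw [h1, h2]

-- per-qid emission equality: A's dict lookup emission = B's rescan emission
lemma pvEmit_eq (gold_data : List (String × List (String × List (List (String × String)))))
    (preds : List PvEntry) (acc : List String × List String) (k : Option String) :
    pvEmitA gold_data acc (k, preds.filter (fun r => pvQid r == k))
      = pvEmitKB gold_data preds acc k := by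
  cases k with
  | none => rfl
  | some q =>
    unfold pvEmitA pvEmitKB
    cases hc : (PySem.Dict.mk gold_data).contains q with
    | false => simp [hc]
    | true =>
      simp only [hc, if_true]
      refine PySem.List.foldl_congr_mem _ _ _ _ ?_
      intro acc2 tv _
      rw [pvPA_get?]
      have hbest : pvBestB preds (some q) tv.1
          = ((pvScores (preds.filter (fun r => pvQid r == some q)) (some tv.1)).map
              pvScore).foldl max (-2) := pvBestB_filter preds (some q) tv.1 (-2)
      by_cases hs : pvScores (preds.filter (fun r => pvQid r == some q)) (some tv.1) = []
      · simp only [hs, if_true]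
        rw [hbest, hs]
        simp
      · simp only [hs, if_false]
        rw [hbest, pvFoldlMax_seed _ hs]
        have hgt : (-2 : Int) <
            ((pvScores (preds.filter (fun r => pvQid r == some q)) (some tv.1)).map
              pvScore).foldl max (-1) :=
          lt_of_lt_of_le (by norm_num) (pvFoldlMax_ge _ _)
        simp only [hgt, if_true]
        rfl

-- ===== VERDICT (by name: the statement is the Claim_ definition above) =====
theorem aggregate_assignment_spec : Claim_equal_aggregate_assignment := by
  intro preds gold _ _
  unfold Spec_aggregate_assignment aggregate_assignment aggregate_assignment_alt
  rw [pvStepB_foldl gold preds preds PySem.Set.empty ([], [])]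
  rw [PySem.Dict.items_eq_map_keys _ (pvGroupA_nodup preds) [],
    pvGroupA_keys, List.foldl_map]
  have hkeys : PySem.Set.update ([] : List (Option String)) (preds.map pvQid)
      = pvNewKeys PySem.Set.empty (preds.map pvQid) := by
    have := pvSet_update_eq_newKeys (preds.map pvQid) ([] : PySem.Set (Option String))
    simpa [PySem.Set.empty] using this
  rw [hkeys]
  refine PySem.List.foldl_congr_mem _ _ _ _ ?_
  intro acc k _
  rw [pvGroup_getD]
  simp only [PySem.Dict.getD_empty, List.nil_append]
  exact pvEmit_eq gold preds acc k
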